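-- pv_equiv track=rewrite | github.com/RezaAbyar/gtsgit | api/views.py | validate_serial_format
-- ===== SOURCE A (Python) =====
-- def validate_serial_format(serial):
--     """
--     Validate that serial has exactly 2 English letters at the beginning and the rest are digits
--     Example valid formats: AB1234, XY98765
--     """
--     if len(serial) < 5 or len(serial) > 9:
--         return False
--
--     # Check first two characters are English letters (upper or lower case)
--     # Check if format is two letters followed by digits
--     if len(serial) >= 5:
--         first_tree = serial[:3]
--         if first_tree.isalpha():
--             return False
--         first_two = serial[:2]
--         if (first_two.isalpha() and all(ord(c) < 128 for c in first_two)
--                 and serial[2:].isdigit()):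
--             return True
--
--         # Check if format is one letter followed by digits
--         first_char = serial[0]
--         if (first_char.isalpha() and ord(first_char) < 128
--                 and serial[1:].isdigit()):
--             return True
--
--     return False
-- ===== SOURCE B (Python) =====
-- def validate_serial_format(serial):
--     n = 0
--     while n < len(serial) and serial[n].isalpha() and ord(serial[n]) < 128:
--         n += 1
--     return 5 <= len(serial) <= 9 and n in (1, 2) and serial[n:].isdigit()
-- ===== Notes on version B (the rewrite author's own statement) =====
-- stated objective: simpler
-- what changed: Replaces A's cascade of slice-and-test branches (serial[:3], serial[:2], serial[2:], serial[0], serial[1:]) with a single scan counting the leading ASCII letters n, then one check that len is 5..9, n is 1 or 2, and serial[n:] is all digits.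
import Mathlib
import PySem

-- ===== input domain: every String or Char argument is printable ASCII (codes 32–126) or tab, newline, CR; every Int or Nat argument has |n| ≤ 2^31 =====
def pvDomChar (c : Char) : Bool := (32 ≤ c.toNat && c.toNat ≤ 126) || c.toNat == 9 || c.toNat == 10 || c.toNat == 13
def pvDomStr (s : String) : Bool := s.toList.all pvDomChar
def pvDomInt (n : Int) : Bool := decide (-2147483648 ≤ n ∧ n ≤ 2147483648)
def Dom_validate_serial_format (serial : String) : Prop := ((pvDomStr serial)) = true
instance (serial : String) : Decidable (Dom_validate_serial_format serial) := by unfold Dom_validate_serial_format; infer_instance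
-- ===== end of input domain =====

-- B replaces A's cascade of slice-and-test branches with one scan counting the leading ASCII
-- letters plus a single final check; same return value (objective: simpler).

-- ===== PORT A =====
def validate_serial_format (serial : String) : Bool :=
  let cs := serial.toList
  if cs.length < 5 || 9 < cs.length then false
  else if 5 ≤ cs.length then
    let first_tree := PySem.List.slice cs none (some 3)
    if PySem.Chars.strIsalpha first_tree then false
    else
      let first_two := PySem.List.slice cs none (some 2)
      if PySem.Chars.strIsalpha first_two
          && first_two.all (fun c => decide (c.toNat < 128))
          && PySem.Chars.strIsdigit (PySem.List.slice cs (some 2) none) then true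
      else
        match PySem.List.pyGet? cs 0 with
        | none => false
        | some first_char =>
          if PySem.Chars.isalpha first_char && decide (first_char.toNat < 128)
              && PySem.Chars.strIsdigit (PySem.List.slice cs (some 1) none) then true
          else false
  else false

-- ===== PORT B =====
def pvCountLeadingAsciiAlpha (cs : List Char) : Nat :=
  match cs with
  | [] => 0
  | c :: rest =>
    if PySem.Chars.isalpha c && decide (c.toNat < 128)
    then pvCountLeadingAsciiAlpha rest + 1 else 0

def validate_serial_format_alt (serial : String) : Bool :=
  let cs := serial.toList
  let n := pvCountLeadingAsciiAlpha cs
  decide (5 ≤ cs.length) && decide (cs.length ≤ 9) && (n == 1 || n == 2)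
    && PySem.Chars.strIsdigit (PySem.List.slice cs (some (n : Int)) none)

-- ===== PRECONDITION & SPEC =====
def Spec_validate_serial_format (serial : String) (out : Bool) : Prop := out = validate_serial_format_alt serial
instance (serial : String) (out : Bool) : Decidable (Spec_validate_serial_format serial out) := by unfold Spec_validate_serial_format; infer_instance

-- ===== CLAIM (what is proved, stated in full; the proofs are below) =====
def Claim_equal_validate_serial_format : Prop := ∀ (serial : String), Dom_validate_serial_format serial → Spec_validate_serial_format serial (validate_serial_format serial)

-- ===== LEMMAS AND PROOFS =====
theorem pvAlpha_lt_128 (c : Char) (h : PySem.Chars.isalpha c = true) :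
    decide (c.toNat < 128) = true := by
  simp only [PySem.Chars.isalpha, PySem.Chars.isupper, PySem.Chars.islower, Bool.or_eq_true,
    Bool.and_eq_true, decide_eq_true_eq, Char.le_def, UInt32.le_iff_toNat_le,
    show ('A').val.toNat = 65 from rfl, show ('Z').val.toNat = 90 from rfl,
    show ('a').val.toNat = 97 from rfl, show ('z').val.toNat = 122 from rfl] at h
  simp only [decide_eq_true_eq, Char.toNat]
  omega

theorem pvAlpha_not_digit (c : Char) (h : PySem.Chars.isalpha c = true) :
    PySem.Chars.isdigit c = false := by
  simp only [PySem.Chars.isalpha, PySem.Chars.isupper, PySem.Chars.islower, PySem.Chars.isdigit,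
    Bool.or_eq_true, Bool.and_eq_true, decide_eq_true_eq, Char.le_def, UInt32.le_iff_toNat_le,
    show ('A').val.toNat = 65 from rfl, show ('Z').val.toNat = 90 from rfl,
    show ('a').val.toNat = 97 from rfl, show ('z').val.toNat = 122 from rfl,
    show ('0').val.toNat = 48 from rfl, show ('9').val.toNat = 57 from rfl,
    Bool.and_eq_false_iff, decide_eq_false_iff_not, not_le] at *
  omega

theorem validate_serial_format_eq (serial : String) :
    validate_serial_format serial = validate_serial_format_alt serial := by
  unfold validate_serial_format validate_serial_format_alt
  generalize serial.toList = cs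
  rcases cs with _ | ⟨a, _ | ⟨b, _ | ⟨c, rest⟩⟩⟩
  · rfl
  · rfl
  · rfl
  · simp only [List.length_cons]
    by_cases hlo : rest.length + 1 + 1 + 1 < 5
    · simp only [hlo, decide_true, Bool.true_or, if_true]
      have : ¬ (5 ≤ rest.length + 1 + 1 + 1) := by omega
      simp [this]
    · by_cases hhi : 9 < rest.length + 1 + 1 + 1
      · have : ¬ (rest.length + 1 + 1 + 1 ≤ 9) := by omega
        simp [hhi, this]
      · -- 5 ≤ len ≤ 9
        have h5 : 5 ≤ rest.length + 1 + 1 + 1 := by omega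
        have h9 : rest.length + 1 + 1 + 1 ≤ 9 := by omega
        simp only [hlo, hhi, decide_false, Bool.or_self, h5, decide_true, if_true, h9, Bool.true_and]
        rw [PySem.List.slice_to _ (by norm_num), PySem.List.slice_from _ (by norm_num),
            PySem.List.slice_from _ (by norm_num)]
        rw [show ((2:Int).toNat) = 2 from rfl, show ((1:Int).toNat) = 1 from rfl,
            show ((3:Int).toNat) = 3 from rfl,
            PySem.List.slice_to _ (show (0:Int) ≤ 2 by norm_num),
            PySem.List.slice_from _ (Int.natCast_nonneg _), Int.toNat_natCast]
        have h0 : (0:Int) ≤ (rest.length:Int) + 1 + 1 := by positivity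
        by_cases ha : PySem.Chars.isalpha a = true
        · have ha128 : a.toNat < 128 := by simpa using pvAlpha_lt_128 a ha
          by_cases hb : PySem.Chars.isalpha b = true
          · have hb128 : b.toNat < 128 := by simpa using pvAlpha_lt_128 b hb
            by_cases hc : PySem.Chars.isalpha c = true
            · -- three leading letters: A hits the first_tree guard, B has n ≥ 3
              simp [pvCountLeadingAsciiAlpha, PySem.Chars.strIsalpha, ha, hb, hc,
                ha128, hb128, pvAlpha_lt_128 c hc]
            · -- exactly two leading letters: both reduce to isdigit(serial[2:])
              simp [pvCountLeadingAsciiAlpha, PySem.Chars.strIsalpha, PySem.Chars.strIsdigit,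
                PySem.List.pyGet?, PySem.List.pyIdx?, ha, hb, hc, ha128, hb128, h0,
                pvAlpha_not_digit b hb]
              rw [Bool.eq_iff_iff]
              simp
          · -- exactly one leading letter: both reduce to isdigit(serial[1:])
            simp [pvCountLeadingAsciiAlpha, PySem.Chars.strIsalpha, PySem.Chars.strIsdigit,
              PySem.List.pyGet?, PySem.List.pyIdx?, ha, hb, ha128, h0]
            rw [Bool.eq_iff_iff]
            simp
        · -- no leading letter: both false
          simp [pvCountLeadingAsciiAlpha, PySem.Chars.strIsalpha, PySem.Chars.strIsdigit,
            PySem.List.pyGet?, PySem.List.pyIdx?, ha, h0]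

-- ===== VERDICT (by name: the statement is the Claim_ definition above) =====
theorem validate_serial_format_spec : Claim_equal_validate_serial_format := by
  intro serial _
  exact validate_serial_format_eq serial
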